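-- pv_equiv track=rewrite | github.com/yuga-2920/ebay_seller_tools_asics | スクレイピングツール/ebay_asics.py | delete_word_after
-- ===== SOURCE A (Python) =====
-- def delete_word_after(word, delete_after_list, add_name_list):
--
--     word_list = word.split(" ")
--
--     for delete_word in delete_after_list:
--         if delete_word.lower() in word_list:
--             word_list.remove(delete_word.lower())
--         if delete_word.capitalize() in word_list:
--             word_list.remove(delete_word.capitalize())
--
--     for add_word in add_name_list:
--         if add_word.lower() in word_list:
--             word_list.remove(add_word.lower())
--         if add_word.capitalize() in word_list:
--             word_list.remove(add_word.capitalize())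
--
--     return word_list
-- ===== SOURCE B (Python) =====
-- def delete_word_after(word, delete_after_list, add_name_list):
--     counts = {}
--     for entry in delete_after_list + add_name_list:
--         for v in (entry.lower(), entry.capitalize()):
--             counts[v] = counts.get(v, 0) + 1
--     result = []
--     for w in word.split(" "):
--         c = counts.get(w, 0)
--         if c > 0:
--             counts[w] = c - 1
--         else:
--             result.append(w)
--     return result
-- ===== Notes on version B (the rewrite author's own statement) =====
-- stated objective: alternative
-- what changed: Replaces A's repeated membership-scan-plus-remove over the word list (one scan pair per entry) with a removal-count dictionary built once from both lists and a single forward filtering pass over the words.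
import Mathlib
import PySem

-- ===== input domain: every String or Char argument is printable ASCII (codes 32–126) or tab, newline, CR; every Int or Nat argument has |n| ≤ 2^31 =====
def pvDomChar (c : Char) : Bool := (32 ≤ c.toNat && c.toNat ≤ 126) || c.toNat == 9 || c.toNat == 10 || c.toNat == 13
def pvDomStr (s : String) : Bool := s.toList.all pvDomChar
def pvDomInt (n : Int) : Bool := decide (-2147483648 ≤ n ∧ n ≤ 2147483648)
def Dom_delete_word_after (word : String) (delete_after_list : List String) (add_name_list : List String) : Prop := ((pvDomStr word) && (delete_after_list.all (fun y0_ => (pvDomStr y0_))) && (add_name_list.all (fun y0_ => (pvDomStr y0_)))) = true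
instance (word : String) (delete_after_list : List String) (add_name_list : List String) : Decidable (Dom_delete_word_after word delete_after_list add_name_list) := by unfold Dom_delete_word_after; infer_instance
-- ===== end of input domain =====

-- B replaces A's repeated membership-scan-plus-remove loops by one removal-count dictionary
-- built from both lists and a single forward filtering pass over the words (objective: alternative).

-- ===== PORT A =====
-- str.capitalize(): first char uppercased, rest lowered (exact on the ASCII domain; both Pythons call this builtin)
def pvCap (s : String) : String :=
  match s.toList with
  | [] => ""
  | c :: rest => String.ofList (PySem.Chars.upperChar c :: PySem.Chars.lower rest)

-- body of A's two identical loops: guarded remove of lower then capitalize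
-- (word_list.remove(v) under the 'if v in word_list' guard = List.erase, first occurrence, no ValueError)
def pvStepA (wl : List String) (e : String) : List String :=
  let v := PySem.Str.lower e
  let wl := if v ∈ wl then wl.erase v else wl
  let c := pvCap e
  if c ∈ wl then wl.erase c else wl

def delete_word_after (word : String) (delete_after_list : List String) (add_name_list : List String) : List String :=
  let word_list := ((PySem.Str.split? word " ").getD [])
  let word_list := delete_after_list.foldl pvStepA word_list
  let word_list := add_name_list.foldl pvStepA word_list
  word_list

-- ===== PORT B =====
-- counts[v] = counts.get(v, 0) + 1
def pvIncB (d : PySem.Dict String Int) (v : String) : PySem.Dict String Int :=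
  d.insert v (d.getD v 0 + 1)

def delete_word_after_alt (word : String) (delete_after_list : List String) (add_name_list : List String) : List String :=
  let counts := (delete_after_list ++ add_name_list).foldl
    (fun d e => pvIncB (pvIncB d (PySem.Str.lower e)) (pvCap e)) PySem.Dict.empty
  let r := (((PySem.Str.split? word " ").getD [])).foldl
    (fun s w =>
      let c := s.1.getD w 0
      if 0 < c then (s.1.insert w (c - 1), s.2) else (s.1, s.2 ++ [w]))
    (counts, ([] : List String))
  r.2

-- ===== PRECONDITION & SPEC =====
def Spec_delete_word_after (word : String) (delete_after_list : List String) (add_name_list : List String) (out : List String) : Prop := out = delete_word_after_alt word delete_after_list add_name_list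
instance (word : String) (delete_after_list : List String) (add_name_list : List String) (out : List String) : Decidable (Spec_delete_word_after word delete_after_list add_name_list out) := by unfold Spec_delete_word_after; infer_instance

-- ===== CLAIM (what is proved, stated in full; the proofs are below) =====
def Claim_equal_delete_word_after : Prop := ∀ (word : String) (delete_after_list : List String) (add_name_list : List String), Dom_delete_word_after word delete_after_list add_name_list → Spec_delete_word_after word delete_after_list add_name_list (delete_word_after word delete_after_list add_name_list)

-- ===== LEMMAS AND PROOFS =====

-- the removal requests as a flat list: lower then capitalize of each entry
def pvReqs (l : List String) : List String := l.flatMap (fun e => [PySem.Str.lower e, pvCap e])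

-- A's loop is the fold of plain List.erase over the requests
theorem pvStepA_eq (wl : List String) (e : String) :
    pvStepA wl e = (wl.erase (PySem.Str.lower e)).erase (pvCap e) := by
  simp only [pvStepA]
  by_cases h1 : PySem.Str.lower e ∈ wl
  · rw [if_pos h1]
    by_cases h2 : pvCap e ∈ wl.erase (PySem.Str.lower e)
    · rw [if_pos h2]
    · rw [if_neg h2, List.erase_of_not_mem h2]
  · rw [if_neg h1, List.erase_of_not_mem h1]
    by_cases h2 : pvCap e ∈ wl
    · rw [if_pos h2]
    · rw [if_neg h2, List.erase_of_not_mem h2]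

theorem foldl_stepA_eq (l : List String) (wl : List String) :
    l.foldl pvStepA wl = (pvReqs l).foldl (fun l v => l.erase v) wl := by
  induction l generalizing wl with
  | nil => rfl
  | cons e t ih => simp [pvReqs, pvStepA_eq, List.flatMap_cons, ih]

-- B's count dictionary is the insert-increment fold over the same requests
theorem countsB_eq (l : List String) (d : PySem.Dict String Int) :
    l.foldl (fun d e => pvIncB (pvIncB d (PySem.Str.lower e)) (pvCap e)) d
      = (pvReqs l).foldl (fun d x => d.insert x (d.getD x 0 + 1)) d := by
  induction l generalizing d with
  | nil => rfl
  | cons e t ih =>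
    simp only [List.foldl_cons, pvReqs, List.flatMap_cons] at *
    rw [ih]; rfl

-- erase-folds over two lists with equal counts agree (proof tool)
theorem foldl_erase_nil (rs : List String) :
    rs.foldl (fun l v => l.erase v) [] = [] := by
  induction rs with
  | nil => rfl
  | cons r t ih => simpa using ih

theorem foldl_erase_perm {rs rs' : List String} (h : rs.Perm rs') (wl : List String) :
    rs.foldl (fun l v => l.erase v) wl = rs'.foldl (fun l v => l.erase v) wl := by
  induction h generalizing wl with
  | nil => rfl
  | cons x _ ih => simp only [List.foldl_cons]; exact ih _
  | swap x y l => simp only [List.foldl_cons, List.erase_comm]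
  | trans _ _ ih1 ih2 => exact (ih1 wl).trans (ih2 wl)

theorem foldl_erase_not_mem {x : String} {rs : List String} (h : x ∉ rs) (xs : List String) :
    rs.foldl (fun l v => l.erase v) (x :: xs) = x :: rs.foldl (fun l v => l.erase v) xs := by
  induction rs generalizing xs with
  | nil => rfl
  | cons r t ih =>
    have hx : x ≠ r := fun e => h (e ▸ List.mem_cons_self ..)
    simp only [List.foldl_cons, List.erase_cons]
    rw [if_neg (by simpa using hx)]
    exact ih (fun m => h (List.mem_cons_of_mem _ m)) _

-- the single filtering pass, written as structural recursion on the word list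
def pvGo : List String → PySem.Dict String Int → List String
  | [], _ => []
  | x :: xs, d =>
      if 0 < d.getD x 0 then pvGo xs (d.insert x (d.getD x 0 - 1)) else x :: pvGo xs d

theorem pvGo_eq_foldl_erase (wl : List String) :
    ∀ (rs : List String) (d : PySem.Dict String Int),
      (∀ v, d.getD v 0 = (rs.count v : Int)) →
      pvGo wl d = rs.foldl (fun l v => l.erase v) wl := by
  induction wl with
  | nil => intro rs d _; simp [pvGo, foldl_erase_nil]
  | cons x xs ih =>
    intro rs d hd
    by_cases h : 0 < d.getD x 0
    · have hmem : x ∈ rs := by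
        have := hd x; rw [this] at h
        exact List.count_pos_iff.mp (by exact_mod_cast h)
      have hperm := List.perm_cons_erase hmem
      rw [foldl_erase_perm hperm]
      simp only [List.foldl_cons, List.erase_cons_head]
      rw [pvGo, if_pos h]
      refine ih (rs.erase x) _ ?_
      intro v
      rw [PySem.Dict.getD_insert]
      by_cases hv : v = x
      · rw [if_pos hv, hv, hd x, List.count_erase_self]
        have hc : 0 < rs.count x := List.count_pos_iff.mpr hmem
        omega
      · rw [if_neg hv, hd v, List.count_erase_of_ne hv]
    · have hz : rs.count x = 0 := by
        have := hd x; omega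
      have hnm : x ∉ rs := List.count_eq_zero.mp hz
      rw [foldl_erase_not_mem hnm, pvGo, if_neg h]
      exact congrArg (x :: ·) (ih rs d hd)

-- B's foldl pass computes pvGo (accumulator form)
theorem foldl_pass_eq_pvGo (wl : List String) :
    ∀ (d : PySem.Dict String Int) (acc : List String),
      (wl.foldl (fun s w =>
          let c := s.1.getD w 0
          if 0 < c then (s.1.insert w (c - 1), s.2) else (s.1, s.2 ++ [w]))
        (d, acc)).2 = acc ++ pvGo wl d := by
  induction wl with
  | nil => intro d acc; simp [pvGo]
  | cons x xs ih =>
    intro d acc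
    by_cases h : 0 < d.getD x 0 <;>
      simp [pvGo, h, ih, List.append_assoc]

-- ===== VERDICT (by name: the statement is the Claim_ definition above) =====
theorem delete_word_after_spec : Claim_equal_delete_word_after := by
  intro word dl al _
  simp only [Spec_delete_word_after, delete_word_after, delete_word_after_alt]
  rw [countsB_eq, foldl_pass_eq_pvGo, List.nil_append, ← List.foldl_append, foldl_stepA_eq]
  refine (pvGo_eq_foldl_erase _ (pvReqs (dl ++ al)) _ ?_).symm
  intro v
  rw [PySem.Dict.getD_foldl_insert_add_one]
  simp
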